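-- pv_equiv track=rewrite | github.com/wsysissi/NanYang-program-interview | question7/question7.2/code_question_7_2.py | coo_index
-- ===== SOURCE A (Python) =====
-- def coo_index (x_list,D,L):
--     index = x_list[0]
--     for d in range(1,D):
--         pi_L = 1
--         for i in range(0,d):
--             pi_L = pi_L*L[i]
--         index = x_list[d] * pi_L + index
--     return index
-- ===== SOURCE B (Python) =====
-- def coo_index(x_list, D, L):
--     index = x_list[0]
--     pi = 1
--     for d in range(1, D):
--         pi = pi * L[d - 1]
--         index = index + x_list[d] * pi
--     return index
-- ===== Notes on version B (the rewrite author's own statement) =====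
-- stated objective: faster
-- what changed: Replaces A's inner loop that rebuilds the prefix product of L from scratch at every dimension with a single running prefix-product accumulator updated once per dimension.
import Mathlib
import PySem

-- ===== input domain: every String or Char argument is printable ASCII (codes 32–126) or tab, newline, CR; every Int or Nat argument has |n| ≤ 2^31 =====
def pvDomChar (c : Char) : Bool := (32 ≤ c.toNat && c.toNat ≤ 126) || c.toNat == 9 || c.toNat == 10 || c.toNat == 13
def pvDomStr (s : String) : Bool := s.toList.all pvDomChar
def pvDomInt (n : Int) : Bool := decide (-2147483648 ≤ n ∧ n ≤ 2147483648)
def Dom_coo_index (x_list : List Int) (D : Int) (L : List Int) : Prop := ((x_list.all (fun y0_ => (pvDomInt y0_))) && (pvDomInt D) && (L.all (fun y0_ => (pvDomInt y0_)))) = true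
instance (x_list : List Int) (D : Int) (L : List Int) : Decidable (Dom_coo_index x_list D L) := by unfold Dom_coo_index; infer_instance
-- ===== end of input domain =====

-- B maintains the prefix product of L in a single running accumulator instead of A's inner loop
-- that recomputes it from scratch for every dimension (O(D) instead of O(D^2)).

-- ===== PORT A =====
def coo_index (x_list : List Int) (D : Int) (L : List Int) : Int :=
  (PySem.List.pyRange 1 D 1).foldl (fun index d =>
    let pi_L := (PySem.List.pyRange 0 d 1).foldl (fun p i => p * PySem.List.pyGetD L i 0) 1
    PySem.List.pyGetD x_list d 0 * pi_L + index) (PySem.List.pyGetD x_list 0 0)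

-- ===== PORT B =====
def coo_index_alt (x_list : List Int) (D : Int) (L : List Int) : Int :=
  ((PySem.List.pyRange 1 D 1).foldl (fun (s : Int × Int) d =>
    let pi := s.2 * PySem.List.pyGetD L (d - 1) 0
    (s.1 + PySem.List.pyGetD x_list d 0 * pi, pi)) (PySem.List.pyGetD x_list 0 0, 1)).1

-- ===== PRECONDITION & SPEC =====
-- Pre_ is exactly where the Python A returns without an IndexError: x_list nonempty
-- (x_list[0]), every used index x_list[d] (d < D) and L[i] (i ≤ D-2) in range.
def Pre_coo_index (x_list : List Int) (D : Int) (L : List Int) : Prop :=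
  x_list ≠ [] ∧ D ≤ (x_list.length : Int) ∧ D - 1 ≤ (L.length : Int)
instance (x_list : List Int) (D : Int) (L : List Int) : Decidable (Pre_coo_index x_list D L) := by
  unfold Pre_coo_index; infer_instance
def pvWitness_coo_index : List Int × Int × List Int := ([2, 1, 3], 3, [4, 5, 6])

def Spec_coo_index (x_list : List Int) (D : Int) (L : List Int) (out : Int) : Prop := out = coo_index_alt x_list D L
instance (x_list : List Int) (D : Int) (L : List Int) (out : Int) : Decidable (Spec_coo_index x_list D L out) := by unfold Spec_coo_index; infer_instance

-- ===== CLAIM (what is proved, stated in full; the proofs are below) =====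
def Claim_equal_coo_index : Prop := ∀ (x_list : List Int) (D : Int) (L : List Int), Dom_coo_index x_list D L → Pre_coo_index x_list D L → Spec_coo_index x_list D L (coo_index x_list D L)

-- ===== LEMMAS AND PROOFS =====

-- A's inner loop value at dimension d (the prefix product of L up to d, via getD like the port).
def pvPi (L : List Int) (d : Int) : Int :=
  (PySem.List.pyRange 0 d 1).foldl (fun p i => p * PySem.List.pyGetD L i 0) 1

lemma pvPi_succ (L : List Int) (d : Int) (hd : 0 ≤ d) :
    pvPi L (d + 1) = pvPi L d * PySem.List.pyGetD L d 0 := by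
  unfold pvPi
  rw [PySem.List.pyRange_one_succ_right hd, List.foldl_append]
  simp

-- Joint invariant: B's pair after the range 1..(1+n) is (A's accumulator, prefix product).
lemma pvLoop (x_list : List Int) (L : List Int) (n : Nat) :
    (PySem.List.pyRange 1 (1 + (n : Int)) 1).foldl (fun (s : Int × Int) d =>
        let pi := s.2 * PySem.List.pyGetD L (d - 1) 0
        (s.1 + PySem.List.pyGetD x_list d 0 * pi, pi)) (PySem.List.pyGetD x_list 0 0, 1)
    = ((PySem.List.pyRange 1 (1 + (n : Int)) 1).foldl (fun index d =>
        let pi_L := (PySem.List.pyRange 0 d 1).foldl (fun p i => p * PySem.List.pyGetD L i 0) 1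
        PySem.List.pyGetD x_list d 0 * pi_L + index) (PySem.List.pyGetD x_list 0 0),
       pvPi L (n : Int)) := by
  induction n with
  | zero =>
      simp [pvPi, PySem.List.pyRange_one_eq_nil (le_refl (0 : Int))]
  | succ n ih =>
      have hsplit : PySem.List.pyRange 1 (1 + ((n : Int) + 1)) 1
          = PySem.List.pyRange 1 (1 + (n : Int)) 1 ++ [1 + (n : Int)] := by
        have := PySem.List.pyRange_one_succ_right (a := 1) (b := 1 + (n : Int)) (by omega)
        rw [show (1 : Int) + ((n : Int) + 1) = (1 + (n : Int)) + 1 by ring, this]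
      push_cast
      rw [hsplit, List.foldl_append, List.foldl_append, ih]
      simp only [List.foldl_cons, List.foldl_nil]
      have hx : (1 : Int) + (n : Int) - 1 = (n : Int) := by ring
      have hpi : pvPi L ((n : Int) + 1) = pvPi L (n : Int) * PySem.List.pyGetD L (n : Int) 0 :=
        pvPi_succ L (n : Int) (by positivity)
      simp only [Prod.mk.injEq]
      constructor
      · rw [hx]
        have : (PySem.List.pyRange 0 (1 + (n : Int)) 1).foldl
            (fun p i => p * PySem.List.pyGetD L i 0) 1 = pvPi L ((n : Int) + 1) := by
          unfold pvPi; rw [show (1 : Int) + (n : Int) = (n : Int) + 1 by ring]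
        rw [this, hpi]; ring
      · rw [hx]; exact hpi.symm

lemma coo_eq (x_list : List Int) (D : Int) (L : List Int) :
    coo_index x_list D L = coo_index_alt x_list D L := by
  unfold coo_index coo_index_alt
  by_cases h : D ≤ 1
  · rw [PySem.List.pyRange_one_eq_nil h]; rfl
  · have hn : D = 1 + ((D - 1).toNat : Int) := by omega
    rw [hn, pvLoop]

-- ===== VERDICT (by name: the statement is the Claim_ definition above) =====
theorem coo_index_spec : Claim_equal_coo_index := by
  intro x_list D L _ _
  exact (coo_eq x_list D L).symm ▸ rfl
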